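-- pv_equiv track=rewrite | github.com/jimbobbennett/ancient-cryptography | decrypt/frequencyanalysis.py | get_digraph_counts
-- ===== SOURCE A (Python) =====
-- def get_digraph_counts(text: str) -> dict:
--     '''
--     Counts the digraphs in the text
--     '''
--     digrahps = {}
--     for i in range(0, len(text)-1):
--         if text[i].isalpha() and text[i+1].isalpha():
--             digraph = text[i] + text[i+1]
--             if digraph in digrahps:
--                 digrahps[digraph] = digrahps[digraph] + 1
--             else:
--                 digrahps[digraph] = 1
--
--     return digrahps
-- ===== SOURCE B (Python) =====
-- def get_digraph_counts(text: str) -> dict: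
--     '''
--     Counts the digraphs in the text
--     '''
--     counts = {}
--     # split the text into maximal runs of alphabetic characters
--     runs = []
--     current = ""
--     for ch in text:
--         if ch.isalpha():
--             current += ch
--         else:
--             if current:
--                 runs.append(current)
--             current = ""
--     if current:
--         runs.append(current)
--     # every digraph lies inside exactly one run: count each run's internal pairs
--     for run in runs:
--         for a, b in zip(run, run[1:]):
--             digraph = a + b
--             counts[digraph] = counts.get(digraph, 0) + 1
--     return counts
-- ===== Notes on version B (the rewrite author's own statement) =====
-- stated objective: alternative
-- what changed: A's flat indexed scan testing text[i]/text[i+1] for every position is replaced by a two-level decomposition: split the text into maximal alphabetic runs, then count each run's internal adjacent pairs.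
import Mathlib
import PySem

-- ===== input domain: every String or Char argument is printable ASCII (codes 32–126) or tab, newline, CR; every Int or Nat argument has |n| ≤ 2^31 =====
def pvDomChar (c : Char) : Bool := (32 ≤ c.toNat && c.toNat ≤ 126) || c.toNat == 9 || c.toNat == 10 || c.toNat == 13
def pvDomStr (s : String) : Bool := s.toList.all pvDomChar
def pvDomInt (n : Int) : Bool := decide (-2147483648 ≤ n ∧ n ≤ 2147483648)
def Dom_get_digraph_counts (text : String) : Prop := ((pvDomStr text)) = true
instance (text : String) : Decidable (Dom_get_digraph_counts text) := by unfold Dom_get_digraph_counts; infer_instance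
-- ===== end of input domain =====

-- B replaces A's flat indexed both-alpha scan by a two-level pass (split into maximal
-- alphabetic runs, then count each run's internal adjacent pairs); objective: alternative
-- decomposition, same result.

-- ===== PORT A =====
def get_digraph_counts (text : String) : List (String × Int) :=
  let cs := text.toList
  ((PySem.List.pyRange 0 ((cs.length : Int) - 1) 1).foldl
    (fun d i =>
      match PySem.List.pyGet? cs i, PySem.List.pyGet? cs (i + 1) with
      | some a, some b =>
        if PySem.Chars.isalpha a && PySem.Chars.isalpha b then
          let g := String.ofList [a, b]
          if d.contains g then d.insert g (d.getD g 0 + 1) else d.insert g 1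
        else d
      | _, _ => d  -- unreachable: i is drawn from range(0, len-1), so i and i+1 are in range
      )
    PySem.Dict.empty).items

-- ===== PORT B =====
-- the run-splitting loop of Source B: recursion over the characters with the `current` accumulator
def pvRuns : List Char → List Char → List (List Char)
  | [], cur => if cur.isEmpty then [] else [cur]
  | c :: cs, cur =>
    if PySem.Chars.isalpha c then pvRuns cs (cur ++ [c])
    else (if cur.isEmpty then [] else [cur]) ++ pvRuns cs []

def get_digraph_counts_alt (text : String) : List (String × Int) :=
  let runs := pvRuns text.toList []
  (runs.foldl
    (fun d run =>
      (run.zip run.tail).foldl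
        (fun d p => d.modify (String.ofList [p.1, p.2]) 0 (· + 1)) d)
    PySem.Dict.empty).items

-- ===== PRECONDITION & SPEC =====
def Spec_get_digraph_counts (text : String) (out : List (String × Int)) : Prop := out = get_digraph_counts_alt text
instance (text : String) (out : List (String × Int)) : Decidable (Spec_get_digraph_counts text out) := by unfold Spec_get_digraph_counts; infer_instance

-- ===== CLAIM (what is proved, stated in full; the proofs are below) =====
def Claim_equal_get_digraph_counts : Prop := ∀ (text : String), Dom_get_digraph_counts text → Spec_get_digraph_counts text (get_digraph_counts text)

-- ===== LEMMAS AND PROOFS =====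

-- the common per-pair step both loops perform on the dict
def pvStep (d : PySem.Dict String Int) (p : Char × Char) : PySem.Dict String Int :=
  d.modify (String.ofList [p.1, p.2]) 0 (· + 1)

def pvStepIf (d : PySem.Dict String Int) (p : Char × Char) : PySem.Dict String Int :=
  if PySem.Chars.isalpha p.1 && PySem.Chars.isalpha p.2 then pvStep d p else d

def pvFiltPairs (l : List Char) : List (Char × Char) :=
  (l.zip l.tail).filter (fun p => PySem.Chars.isalpha p.1 && PySem.Chars.isalpha p.2)

-- A's contains-branch counting update is exactly Dict.modify … 0 (· + 1)
theorem pvCount_eq_modify (d : PySem.Dict String Int) (g : String) :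
    (if d.contains g then d.insert g (d.getD g 0 + 1) else d.insert g 1)
      = d.modify g 0 (· + 1) := by
  by_cases h : d.contains g = true
  · simp [h]; rfl
  · have hg : d.getD g 0 = 0 := by
      have h2 := (PySem.Dict.get?_eq_none_iff_contains (d := d) (k := g))
      simp at h2
      simp [PySem.Dict.getD, h2.mpr (by simpa using h)]
    have hm : d.modify g 0 (· + 1) = d.insert g (d.getD g 0 + 1) := rfl
    simp [h, hm, hg]

-- A's index loop is the fold of pvStepIf over the adjacent-pair list
theorem pvA_idx_eq_zip : ∀ (cs : List Char) (d : PySem.Dict String Int),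
    (PySem.List.pyRange 0 ((cs.length : Int) - 1) 1).foldl
      (fun d i =>
        match PySem.List.pyGet? cs i, PySem.List.pyGet? cs (i + 1) with
        | some a, some b => pvStepIf d (a, b)
        | _, _ => d) d
    = (cs.zip cs.tail).foldl pvStepIf d := by
  intro cs
  induction cs with
  | nil => intro d; simp [PySem.List.pyRange_one_eq_nil]
  | cons c1 cs ih =>
    cases cs with
    | nil => intro d; simp [PySem.List.pyRange_one_eq_nil]
    | cons c2 rest =>
      intro d
      have hlen : ((((c1 :: c2 :: rest).length : Int)) - 1) = ((rest.length + 1 : Nat) : Int) := by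
        simp
      rw [hlen, PySem.List.pyRange_one]
      have ht : (((rest.length + 1 : Nat) : Int) - 0).toNat = rest.length + 1 := by omega
      rw [ht, List.range_succ_eq_map, List.map_cons, List.foldl_cons, List.map_map,
          List.foldl_map]
      have h0 : (match PySem.List.pyGet? (c1 :: c2 :: rest) ((0 : Int) + ((0 : Nat) : Int)),
                       PySem.List.pyGet? (c1 :: c2 :: rest) ((0 : Int) + ((0 : Nat) : Int) + 1) with
                 | some a, some b => pvStepIf d (a, b)
                 | _, _ => d) = pvStepIf d (c1, c2) := by
        norm_num [PySem.List.pyGet?_of_nonneg]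
      rw [h0, show (c1 :: c2 :: rest).zip (c1 :: c2 :: rest).tail
            = (c1, c2) :: ((c2 :: rest).zip rest) from rfl, List.foldl_cons]
      have ih' := ih (pvStepIf d (c1, c2))
      rw [PySem.List.pyRange_one] at ih'
      have ht2 : (((c2 :: rest).length : Int) - 1 - 0).toNat = rest.length := by simp
      rw [ht2, List.foldl_map] at ih'
      simp only [List.tail_cons] at ih'
      rw [← ih']
      apply PySem.List.foldl_congr_mem
      intro d' k hk
      have e1 : PySem.List.pyGet? (c1 :: c2 :: rest) ((0 : Int) + ((Nat.succ k : Nat) : Int))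
          = PySem.List.pyGet? (c2 :: rest) ((0 : Int) + (k : Int)) := by
        simp
      have e2 : PySem.List.pyGet? (c1 :: c2 :: rest) ((0 : Int) + ((Nat.succ k : Nat) : Int) + 1)
          = PySem.List.pyGet? (c2 :: rest) ((0 : Int) + (k : Int) + 1) := by
        have g1 : (0 : Int) + ((Nat.succ k : Nat) : Int) + 1 = ((k + 2 : Nat) : Int) := by push_cast; ring
        have g2 : (0 : Int) + (k : Int) + 1 = ((k + 1 : Nat) : Int) := by push_cast; ring
        rw [g1, g2]
        simp only [PySem.List.pyGet?_natCast, List.getElem?_cons_succ]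
      simp only [Function.comp]
      rw [e1, e2]

-- skipping non-alpha pairs = folding over the filtered list
theorem pvFold_if_eq_filter : ∀ (l : List (Char × Char)) (d : PySem.Dict String Int),
    l.foldl pvStepIf d = (l.filter (fun p => PySem.Chars.isalpha p.1 && PySem.Chars.isalpha p.2)).foldl pvStep d := by
  intro l
  induction l with
  | nil => intro d; rfl
  | cons p l ih =>
    intro d
    by_cases h : (PySem.Chars.isalpha p.1 && PySem.Chars.isalpha p.2) = true
    · simp [pvStepIf, h, ih]
    · simp only [Bool.not_eq_true] at h
      simp [pvStepIf, h, ih]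

theorem pvFp_cons_notalpha (c : Char) (ys : List Char) (hc : PySem.Chars.isalpha c = false) :
    pvFiltPairs (c :: ys) = pvFiltPairs ys := by
  cases ys with
  | nil => rfl
  | cons y ys => simp [pvFiltPairs, hc]

theorem pvFp_cons₂ (a b : Char) (l : List Char) :
    pvFiltPairs (a :: b :: l)
      = (List.filter (fun p => PySem.Chars.isalpha p.1 && PySem.Chars.isalpha p.2) [(a, b)])
        ++ pvFiltPairs (b :: l) := by
  by_cases h : (PySem.Chars.isalpha a && PySem.Chars.isalpha b) = true
  · simp [pvFiltPairs, h]
  · simp only [Bool.not_eq_true] at h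
    simp [pvFiltPairs, h]

theorem pvFp_split : ∀ (xs : List Char) (c : Char) (ys : List Char),
    PySem.Chars.isalpha c = false →
    pvFiltPairs (xs ++ c :: ys) = pvFiltPairs xs ++ pvFiltPairs ys := by
  intro xs
  induction xs with
  | nil => intro c ys hc; simpa using pvFp_cons_notalpha c ys hc
  | cons x xs ih =>
    intro c ys hc
    cases xs with
    | nil =>
      rw [show ((x :: ([] : List Char)) ++ c :: ys) = x :: c :: ys from rfl,
          pvFp_cons₂ x c ys, pvFp_cons_notalpha c ys hc]
      simp [pvFiltPairs, hc]
    | cons x2 xs' =>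
      rw [show ((x :: x2 :: xs') ++ c :: ys) = x :: x2 :: (xs' ++ c :: ys) from rfl,
          pvFp_cons₂ x x2 (xs' ++ c :: ys)]
      rw [show (x2 :: (xs' ++ c :: ys)) = ((x2 :: xs') ++ c :: ys) from rfl,
          ih c ys hc, pvFp_cons₂ x x2 xs', List.append_assoc]

-- pairs of an all-alpha list survive the filter unchanged
theorem pvFp_all_alpha (l : List Char) (h : l.all PySem.Chars.isalpha = true) :
    pvFiltPairs l = l.zip l.tail := by
  apply List.filter_eq_self.mpr
  intro p hp
  have h1 := List.of_mem_zip hp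
  simp only [List.all_eq_true] at h
  have ha := h _ h1.1
  have hb := h _ (List.mem_of_mem_tail h1.2)
  simp [ha, hb]

-- the run decomposition yields exactly the alpha-alpha adjacent pairs, in order
theorem pvRuns_flat : ∀ (cs cur : List Char), cur.all PySem.Chars.isalpha = true →
    (pvRuns cs cur).flatMap (fun r => r.zip r.tail) = pvFiltPairs (cur ++ cs) := by
  intro cs
  induction cs with
  | nil =>
    intro cur hcur
    by_cases h : cur.isEmpty = true
    · simp [pvRuns, List.isEmpty_iff.mp h, pvFiltPairs]
    · simp [pvRuns, h, pvFp_all_alpha cur hcur]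
  | cons c cs ih =>
    intro cur hcur
    by_cases ha : PySem.Chars.isalpha c = true
    · have : cur ++ c :: cs = (cur ++ [c]) ++ cs := by simp
      rw [this, ← ih (cur ++ [c]) (by simp_all)]
      simp [pvRuns, ha]
    · simp only [Bool.not_eq_true] at ha
      rw [pvFp_split cur c cs ha]
      simp only [pvRuns, ha, Bool.false_eq_true, if_false, List.flatMap_append]
      rw [ih [] rfl]
      congr 1
      by_cases h : cur.isEmpty = true
      · simp [List.isEmpty_iff.mp h, pvFiltPairs]
      · simp [h, pvFp_all_alpha cur hcur]

-- B's nested fold over the runs is the fold over the concatenated pair list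
theorem pvFold_runs : ∀ (rs : List (List Char)) (d : PySem.Dict String Int),
    rs.foldl (fun d run => (run.zip run.tail).foldl pvStep d) d
      = (rs.flatMap (fun r => r.zip r.tail)).foldl pvStep d := by
  intro rs
  induction rs with
  | nil => intro d; rfl
  | cons r rs ih => intro d; simp [List.foldl_append, ih]

-- ===== VERDICT (by name: the statement is the Claim_ definition above) =====
theorem get_digraph_counts_spec : Claim_equal_get_digraph_counts := by
  intro text _
  unfold Spec_get_digraph_counts get_digraph_counts get_digraph_counts_alt
  simp only []
  set cs := text.toList with hcs
  congr 1
  have hA : (PySem.List.pyRange 0 ((cs.length : Int) - 1) 1).foldl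
      (fun d i =>
        match PySem.List.pyGet? cs i, PySem.List.pyGet? cs (i + 1) with
        | some a, some b =>
          if PySem.Chars.isalpha a && PySem.Chars.isalpha b then
            let g := String.ofList [a, b]
            if d.contains g then d.insert g (d.getD g 0 + 1) else d.insert g 1
          else d
        | _, _ => d) (PySem.Dict.empty : PySem.Dict String Int)
      = (PySem.List.pyRange 0 ((cs.length : Int) - 1) 1).foldl
      (fun d i =>
        match PySem.List.pyGet? cs i, PySem.List.pyGet? cs (i + 1) with
        | some a, some b => pvStepIf d (a, b)
        | _, _ => d) (PySem.Dict.empty : PySem.Dict String Int) := by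
    apply PySem.List.foldl_congr_mem
    intro d i hi
    cases PySem.List.pyGet? cs i with
    | none => rfl
    | some a =>
      cases PySem.List.pyGet? cs (i + 1) with
      | none => rfl
      | some b =>
        show (if PySem.Chars.isalpha a && PySem.Chars.isalpha b then _ else d) = pvStepIf d (a, b)
        unfold pvStepIf pvStep
        by_cases h : (PySem.Chars.isalpha a && PySem.Chars.isalpha b) = true
        · simp only [h, if_true]
          exact pvCount_eq_modify d (String.ofList [a, b])
        · simp only [Bool.not_eq_true] at h
          simp [h]
  rw [hA, pvA_idx_eq_zip, pvFold_if_eq_filter]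
  simp only [show (fun (d : PySem.Dict String Int) (p : Char × Char) =>
      d.modify (String.ofList [p.1, p.2]) 0 (· + 1)) = pvStep from rfl]
  rw [pvFold_runs, pvRuns_flat cs [] rfl]
  rfl
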